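-- pv_equiv track=rewrite | github.com/LuccaBello/MOOC-Python-Programming-2025 | part04-11_first_second_last/src/first_second_last.py | second_word
-- ===== SOURCE A (Python) =====
-- def second_word(sentence):
--     word = ""
--     index = 0
--     spaces_found = 0
--     while index < len(sentence):
--         char = sentence[index]
--         if char == ' ':
--             spaces_found = spaces_found + 1
--             if spaces_found == 2:
--                 break
--         elif spaces_found == 1:
--             word = word + char
--         index = index + 1
--     return word
-- ===== SOURCE B (Python) =====
-- def second_word(sentence):
--     parts = sentence.split(' ')
--     return parts[1] if len(parts) > 1 else ''
-- ===== Notes on version B (the rewrite author's own statement) =====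
-- stated objective: idiomatic
-- what changed: Replaces A's character-by-character streaming scan (index loop counting spaces with a break) by the standard split-on-single-space into a token list and indexing parts[1] with a length guard.
import Mathlib
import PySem

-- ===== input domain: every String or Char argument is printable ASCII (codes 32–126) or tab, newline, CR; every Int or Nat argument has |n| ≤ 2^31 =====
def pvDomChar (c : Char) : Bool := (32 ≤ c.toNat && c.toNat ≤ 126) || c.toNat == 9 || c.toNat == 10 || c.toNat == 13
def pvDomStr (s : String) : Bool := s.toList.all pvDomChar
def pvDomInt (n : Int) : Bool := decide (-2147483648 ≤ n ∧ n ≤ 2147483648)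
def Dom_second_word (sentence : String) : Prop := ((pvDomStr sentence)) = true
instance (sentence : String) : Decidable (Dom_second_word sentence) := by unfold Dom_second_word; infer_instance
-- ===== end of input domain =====

-- B replaces A's character-by-character counting scan with split-on-space then index; same value, plainer code.

-- ===== PORT A =====
-- A's while loop: walk the characters, count spaces, collect chars while exactly one
-- space has been seen, break at the second space.
def secondWordLoop : List Char → List Char → Nat → List Char
  | [], word, _ => word
  | c :: rest, word, spaces =>
    if c = ' ' then
      if spaces + 1 = 2 then word
      else secondWordLoop rest word (spaces + 1)
    else if spaces = 1 then secondWordLoop rest (word ++ [c]) spaces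
    else secondWordLoop rest word spaces

def second_word (sentence : String) : String :=
  String.ofList (secondWordLoop sentence.toList [] 0)

-- ===== PORT B =====
-- Source B: parts = sentence.split(' '); return parts[1] if len(parts) > 1 else ''
def second_word_alt (sentence : String) : String :=
  let parts := PySem.Chars.splitOn sentence.toList [' ']
  if 1 < parts.length then String.ofList (parts.getD 1 []) else ""

-- ===== PRECONDITION & SPEC =====
def Spec_second_word (sentence : String) (out : String) : Prop := out = second_word_alt sentence
instance (sentence : String) (out : String) : Decidable (Spec_second_word sentence out) := by unfold Spec_second_word; infer_instance

-- ===== CLAIM (what is proved, stated in full; the proofs are below) =====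
def Claim_equal_second_word : Prop := ∀ (sentence : String), Dom_second_word sentence → Spec_second_word sentence (second_word sentence)

-- ===== LEMMAS AND PROOFS =====

-- reference form of split-on-single-space (proof-side only)
def splitSp (cur : List Char) : List Char → List (List Char)
  | [] => [cur]
  | c :: rest => if c = ' ' then cur :: splitSp [] rest else splitSp (cur ++ [c]) rest

theorem splitOn_go_space (fuel : Nat) :
    ∀ (l cur : List Char) (accs : List (List Char)), l.length ≤ fuel →
    PySem.Chars.splitOn.go [' '] fuel l cur accs = accs.reverse ++ splitSp cur.reverse l := by
  induction fuel with
  | zero =>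
    intro l cur accs hl
    have : l = [] := List.eq_nil_of_length_eq_zero (Nat.le_zero.mp hl)
    subst this
    simp [PySem.Chars.splitOn.go, splitSp]
  | succ fuel ih =>
    intro l cur accs hl
    cases l with
    | nil => simp [PySem.Chars.splitOn.go, splitSp]
    | cons c rest =>
      by_cases hc : c = ' '
      · subst hc
        have hpre : List.isPrefixOf [' '] (' ' :: rest) = true := by
          simp [List.isPrefixOf]
        rw [PySem.Chars.splitOn.go]
        simp only [hpre, if_pos, List.length_cons, List.length_nil, List.drop_succ_cons, List.drop_zero]
        rw [ih rest [] (cur.reverse :: accs) (by simpa using Nat.le_of_succ_le_succ hl)]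
        simp [splitSp]
      · have hpre : List.isPrefixOf [' '] (c :: rest) = false := by
          simp [List.isPrefixOf, BEq.beq]
          intro h; exact hc h.symm
        rw [PySem.Chars.splitOn.go]
        rw [if_neg (by simp [hpre])]
        rw [ih rest (c :: cur) accs (by simpa using Nat.le_of_succ_le_succ hl)]
        simp [splitSp, hc]

theorem splitOn_space (cs : List Char) :
    PySem.Chars.splitOn cs [' '] = splitSp [] cs := by
  unfold PySem.Chars.splitOn
  rw [splitOn_go_space (cs.length + 1) cs [] [] (Nat.le_succ _)]
  rfl

theorem awhile_one (cs : List Char) : ∀ w, secondWordLoop cs w 1 = (splitSp w cs).headI := by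
  induction cs with
  | nil => intro w; simp [secondWordLoop, splitSp]
  | cons c rest ih =>
    intro w
    by_cases hc : c = ' '
    · subst hc; simp [secondWordLoop, splitSp]
    · simp [secondWordLoop, splitSp, hc, ih]

theorem awhile_zero (cs : List Char) : ∀ cur, secondWordLoop cs [] 0 = (splitSp cur cs).tail.headI := by
  induction cs with
  | nil => intro cur; simp [secondWordLoop, splitSp]; rfl
  | cons c rest ih =>
    intro cur
    by_cases hc : c = ' '
    · subst hc; simp [secondWordLoop, splitSp, awhile_one]
    · simp only [secondWordLoop, splitSp, if_neg hc]
      split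
      · omega
      · exact ih (cur ++ [c])

-- ===== VERDICT (by name: the statement is the Claim_ definition above) =====
theorem second_word_spec : Claim_equal_second_word := by
  intro s _
  unfold Spec_second_word second_word second_word_alt
  rw [splitOn_space, awhile_zero s.toList []]
  cases h : splitSp [] s.toList with
  | nil => simp only [List.headI]; rfl
  | cons p tl =>
    cases tl with
    | nil => simp only [List.headI]; rfl
    | cons q tl' => simp [List.headI, List.getD]
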